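-- pv_equiv track=rewrite | github.com/dretyr/adventofai | 2023/5/Code_try2/main_part1_try2.py | parse_almanac
-- ===== SOURCE A (Python) =====
-- def parse_almanac(data):
--     sections = data.split('\n\n')
--     seeds = [int(x) for x in sections[0].split(': ')[1].split()]
--
--     maps = {}
--     for section in sections[1:]:
--         title, *lines = section.split('\n')
--         category = title.split('-to-')[0]
--         maps[category] = [tuple(map(int, line.split())) for line in lines]
--
--     return seeds, maps
-- ===== SOURCE B (Python) =====
-- def parse_almanac(data):
--     # One streaming pass over the raw string with find/partition; no sections list is built.
--     sep = data.find('\n\n')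
--     head = data if sep < 0 else data[:sep]
--     seeds = [int(x) for x in head.split(': ')[1].split()]
--
--     maps = {}
--     rest = None if sep < 0 else data[sep + 2:]
--     while rest is not None:
--         nxt = rest.find('\n\n')
--         section = rest if nxt < 0 else rest[:nxt]
--         title, nl, body = section.partition('\n')
--         dash = title.find('-to-')
--         maps[title if dash < 0 else title[:dash]] = (
--             [tuple(int(x) for x in line.split()) for line in body.split('\n')] if nl else [])
--         rest = None if nxt < 0 else rest[nxt + 2:]
--     return seeds, maps
-- ===== Notes on version B (the rewrite author's own statement) =====
-- stated objective: alternative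
-- what changed: A splits the whole text into a sections list and builds the dict with comprehensions over it; B makes one streaming pass over the raw string with find/partition, consuming one section at a time without materialising the sections list.
import Mathlib
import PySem

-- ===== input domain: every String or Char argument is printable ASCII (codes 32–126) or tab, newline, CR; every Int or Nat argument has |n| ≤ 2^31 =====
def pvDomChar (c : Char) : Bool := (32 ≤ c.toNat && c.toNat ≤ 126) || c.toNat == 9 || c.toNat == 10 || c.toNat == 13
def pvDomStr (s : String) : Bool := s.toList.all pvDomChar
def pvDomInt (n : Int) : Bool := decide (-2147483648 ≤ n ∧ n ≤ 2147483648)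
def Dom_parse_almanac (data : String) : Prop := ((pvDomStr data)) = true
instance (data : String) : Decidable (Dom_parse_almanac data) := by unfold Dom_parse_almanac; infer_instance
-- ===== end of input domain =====

-- B replaces A's split('\n\n')-then-comprehensions decomposition by a single streaming scan of the raw
-- string with find/partition (no sections list is materialised); same return value wherever A returns.

-- ===== PORT A =====
-- [int(x) for x in line.split()] / tuple(map(int, line.split())); int() failure raises in Python: Pre_ excludes it, getD 0 is junk there
def pvIntsA (line : List Char) : List Int :=
  (PySem.Chars.split₀ line).map (fun x => (PySem.Int.ofChars? x).getD 0)

-- the body of A's "for section in sections[1:]" loop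
def pvStepA (d : PySem.Dict (List Char) (List (List Int))) (sec : List Char) :
    PySem.Dict (List Char) (List (List Int)) :=
  let parts := PySem.Chars.splitOn sec ['\n']      -- title, *lines = section.split('\n')
  let title := parts.headD []                      -- split never returns [], so headD is exact
  let lines := parts.tail
  let category := (PySem.Chars.splitOn title ['-', 't', 'o', '-']).headD []
  d.insert category (lines.map pvIntsA)

def parse_almanac (data : String) : List Int × (List (String × List (List Int))) :=
  let sections := PySem.Chars.splitOn data.toList ['\n', '\n']
  -- sections[0].split(': ')[1]: the [1] raises IndexError when absent (outside Pre_); getD [] is junk there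
  let seeds := pvIntsA ((PySem.List.pyGet? (PySem.Chars.splitOn (sections.headD []) [':', ' ']) 1).getD [])
  let maps := sections.tail.foldl pvStepA (PySem.Dict.empty : PySem.Dict (List Char) (List (List Int)))
  (seeds, maps.items.map (fun kv => (String.ofList kv.1, kv.2)))

-- ===== PORT B =====
def pvIntsB (line : List Char) : List Int :=
  (PySem.Chars.split₀ line).map (fun x => (PySem.Int.ofChars? x).getD 0)

-- [tuple(int(x) for x in line.split()) for line in body.split('\n')]
def pvParseBody (body : List Char) : List (List Int) :=
  (PySem.Chars.splitOn body ['\n']).map pvIntsB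

-- one iteration of B's while loop on a section; str.partition('\n') is ported by hand via
-- find + take/drop (exact: find is the first occurrence, partition splits there)
def pvStepB (d : PySem.Dict (List Char) (List (List Int))) (sec : List Char) :
    PySem.Dict (List Char) (List (List Int)) :=
  let i := PySem.Chars.find sec ['\n']
  let title := if i < 0 then sec else sec.take i.toNat
  let value := if i < 0 then [] else pvParseBody (sec.drop (i.toNat + 1))
  let dash := PySem.Chars.find title ['-', 't', 'o', '-']
  let category := if dash < 0 then title else title.take dash.toNat
  d.insert category value

-- B's while loop: rest is the not-yet-consumed remainder (rest = None is the loop exit)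
def pvScan (rest : List Char) (d : PySem.Dict (List Char) (List (List Int))) :
    PySem.Dict (List Char) (List (List Int)) :=
  let nxt := PySem.Chars.find rest ['\n', '\n']
  let d' := pvStepB d (if nxt < 0 then rest else rest.take nxt.toNat)
  if h : nxt < 0 then d' else pvScan (rest.drop (nxt.toNat + 2)) d'
termination_by rest.length
decreasing_by
  have h0 : (0 : Int) ≤ PySem.Chars.find rest ['\n', '\n'] := by omega
  have hinf := (PySem.Chars.find_nonneg_iff (s := rest) (sub := ['\n', '\n'])).mp h0
  have hlen : 2 ≤ rest.length := by simpa using hinf.length_le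
  simp only [List.length_drop]
  omega

def parse_almanac_alt (data : String) : List Int × (List (String × List (List Int))) :=
  let sep := PySem.Chars.find data.toList ['\n', '\n']
  let head := if sep < 0 then data.toList else data.toList.take sep.toNat
  let seeds := pvIntsB ((PySem.List.pyGet? (PySem.Chars.splitOn head [':', ' ']) 1).getD [])
  let maps := if sep < 0 then (PySem.Dict.empty : PySem.Dict (List Char) (List (List Int)))
              else pvScan (data.toList.drop (sep.toNat + 2)) PySem.Dict.empty
  (seeds, maps.items.map (fun kv => (String.ofList kv.1, kv.2)))

-- ===== PRECONDITION & SPEC =====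
-- Pre_ excludes exactly the inputs on which the Python A raises: a first section without the
-- colon-space seeds separator (IndexError) or a non-integer token where int() is applied
-- (ValueError). B raises on exactly the same inputs.
def Pre_parse_almanac (data : String) : Prop :=
  (let sections := PySem.Chars.splitOn data.toList ['\n', '\n']
   let parts := PySem.Chars.splitOn (sections.headD []) [':', ' ']
   2 ≤ parts.length
   ∧ ((PySem.Chars.split₀ ((PySem.List.pyGet? parts 1).getD [])).all
        (fun x => (PySem.Int.ofChars? x).isSome)) = true
   ∧ (sections.tail.all (fun sec =>
        (PySem.Chars.splitOn sec ['\n']).tail.all (fun line =>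
          (PySem.Chars.split₀ line).all (fun x => (PySem.Int.ofChars? x).isSome)))) = true)
instance (data : String) : Decidable (Pre_parse_almanac data) := by unfold Pre_parse_almanac; infer_instance

def pvWitness_parse_almanac : String := "seeds: 79 14\n\nseed-to-soil map:\n50 98 2\n52 50 48"

def Spec_parse_almanac (data : String) (out : List Int × (List (String × List (List Int)))) : Prop := out = parse_almanac_alt data
instance (data : String) (out : List Int × (List (String × List (List Int)))) : Decidable (Spec_parse_almanac data out) := by unfold Spec_parse_almanac; infer_instance

-- ===== CLAIM (what is proved, stated in full; the proofs are below) =====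
def Claim_equal_parse_almanac : Prop := ∀ (data : String), Dom_parse_almanac data → Pre_parse_almanac data → Spec_parse_almanac data (parse_almanac data)

-- ===== LEMMAS AND PROOFS =====

-- structural reference version of str.split(sep) for nonempty sep
def pvSplitRec (sep : List Char) : List Char → List (List Char)
  | [] => [[]]
  | c :: rest =>
    if sep.isPrefixOf (c :: rest) then [] :: pvSplitRec sep (rest.drop (sep.length - 1))
    else (pvSplitRec sep rest).modifyHead (c :: ·)
termination_by l => l.length
decreasing_by
  · simp only [List.length_drop, List.length_cons]; omega
  · simp

theorem pv_ints_eq : pvIntsB = pvIntsA := rfl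

theorem pv_go_eq (sep : List Char) (hsep : sep ≠ []) :
    ∀ (fuel : Nat) (l cur : List Char) (acc : List (List Char)), l.length < fuel →
      PySem.Chars.splitOn.go sep fuel l cur acc =
        acc.reverse ++ (pvSplitRec sep l).modifyHead (cur.reverse ++ ·) := by
  intro fuel
  induction fuel with
  | zero => intro l cur acc h; omega
  | succ n ih =>
    intro l cur acc h
    match l with
    | [] =>
      rw [PySem.Chars.splitOn.go]
      · simp [pvSplitRec]
      · omega
    | c :: rest =>
      rw [PySem.Chars.splitOn.go]
      rw [pvSplitRec]
      by_cases hp : sep.isPrefixOf (c :: rest)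
      · simp only [hp, if_true]
        obtain ⟨s, ss, rfl⟩ : ∃ s ss, sep = s :: ss := by
          cases sep with
          | nil => exact absurd rfl hsep
          | cons s ss => exact ⟨s, ss, rfl⟩
        have hdrop : List.drop (s :: ss).length (c :: rest) = rest.drop ((s :: ss).length - 1) := by
          simp [List.drop_succ_cons]
        rw [hdrop, ih _ _ _ (by simp at h ⊢; omega)]
        cases pvSplitRec (s :: ss) (rest.drop ((s :: ss).length - 1)) <;>
          simp [List.modifyHead]
      · simp only [hp]
        rw [ih rest (c :: cur) acc (by simp at h; omega)]
        cases pvSplitRec sep rest <;> simp [List.modifyHead]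

theorem pv_splitOn_eq (sep : List Char) (hsep : sep ≠ []) (l : List Char) :
    PySem.Chars.splitOn l sep = pvSplitRec sep l := by
  unfold PySem.Chars.splitOn
  rw [pv_go_eq sep hsep _ _ _ _ (by omega)]
  cases pvSplitRec sep l <;> simp [List.modifyHead]

theorem pv_find_unique (l sep : List Char) (k : Nat)
    (h1 : sep <+: l.drop k) (h2 : ∀ i, i < k → ¬ sep <+: l.drop i) :
    PySem.Chars.find l sep = (k : Int) := by
  have hinf : sep <:+: l := h1.isInfix.trans (List.drop_suffix k l).isInfix
  have h0 : 0 ≤ PySem.Chars.find l sep := (PySem.Chars.find_nonneg_iff _ _).mpr hinf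
  obtain ⟨hp, hmin⟩ := PySem.Chars.find_spec h0
  have : (PySem.Chars.find l sep).toNat = k := by
    rcases lt_trichotomy (PySem.Chars.find l sep).toNat k with h | h | h
    · exact absurd hp (h2 _ h)
    · exact h
    · exact absurd h1 (hmin k h)
  omega

theorem pv_find_cons (c : Char) (rest sep : List Char) (hnp : ¬ sep <+: (c :: rest)) :
    PySem.Chars.find (c :: rest) sep =
      if PySem.Chars.find rest sep < 0 then -1 else PySem.Chars.find rest sep + 1 := by
  by_cases h : PySem.Chars.find rest sep < 0
  · have hr : ¬ sep <:+: rest := by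
      rw [← PySem.Chars.find_eq_neg_one_iff]
      have := PySem.Chars.neg_one_le_find rest sep
      omega
    rw [if_pos h, PySem.Chars.find_eq_neg_one_iff]
    rw [List.infix_cons_iff]
    push Not
    exact ⟨hnp, hr⟩
  · have h0 : 0 ≤ PySem.Chars.find rest sep := by omega
    obtain ⟨hp, hmin⟩ := PySem.Chars.find_spec h0
    rw [if_neg h]
    have := pv_find_unique (c :: rest) sep ((PySem.Chars.find rest sep).toNat + 1)
      (by simpa [List.drop_succ_cons] using hp)
      (by
        intro i hi
        match i with
        | 0 => simpa using hnp
        | j + 1 =>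
          simp only [List.drop_succ_cons]
          exact hmin j (by omega))
    omega

theorem pv_splitRec_step (sep : List Char) (hsep : sep ≠ []) (l : List Char) :
    pvSplitRec sep l =
      if PySem.Chars.find l sep < 0 then [l]
      else l.take (PySem.Chars.find l sep).toNat ::
        pvSplitRec sep (l.drop ((PySem.Chars.find l sep).toNat + sep.length)) := by
  induction l with
  | nil =>
    have : PySem.Chars.find [] sep = -1 := by
      rw [PySem.Chars.find_eq_neg_one_iff]
      simp [hsep]
    rw [this]
    simp [pvSplitRec]
  | cons c rest ih =>
    by_cases hp : sep <+: (c :: rest)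
    · have hf : PySem.Chars.find (c :: rest) sep = ((0 : Nat) : Int) :=
        pv_find_unique _ _ 0 (by simpa using hp) (by omega)
      rw [hf]
      rw [if_neg (by omega)]
      rw [pvSplitRec, if_pos (List.isPrefixOf_iff_prefix.mpr hp)]
      obtain ⟨s, ss, rfl⟩ : ∃ s ss, sep = s :: ss := by
        cases sep with
        | nil => exact absurd rfl hsep
        | cons s ss => exact ⟨s, ss, rfl⟩
      simp [List.drop_succ_cons]
    · rw [pvSplitRec, if_neg (by simpa [List.isPrefixOf_iff_prefix] using hp)]
      rw [pv_find_cons c rest sep hp]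
      by_cases h : PySem.Chars.find rest sep < 0
      · rw [if_pos h, if_pos (show (-1 : Int) < 0 by norm_num)]
        rw [ih, if_pos h]
        simp [List.modifyHead]
      · rw [if_neg h]
        rw [if_neg (by omega)]
        rw [ih, if_neg h]
        have h0 : 0 ≤ PySem.Chars.find rest sep := by omega
        have ht : (PySem.Chars.find rest sep + 1).toNat = (PySem.Chars.find rest sep).toNat + 1 := by
          omega
        rw [ht]
        have hd : List.drop ((PySem.Chars.find rest sep).toNat + 1 + sep.length) (c :: rest) =
            rest.drop ((PySem.Chars.find rest sep).toNat + sep.length) := by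
          have : (PySem.Chars.find rest sep).toNat + 1 + sep.length =
              ((PySem.Chars.find rest sep).toNat + sep.length) + 1 := by omega
          rw [this, List.drop_succ_cons]
        rw [hd]
        simp [List.modifyHead, List.take_succ_cons]

theorem pv_splitOn_step (sep : List Char) (hsep : sep ≠ []) (l : List Char) :
    PySem.Chars.splitOn l sep =
      if PySem.Chars.find l sep < 0 then [l]
      else l.take (PySem.Chars.find l sep).toNat ::
        PySem.Chars.splitOn (l.drop ((PySem.Chars.find l sep).toNat + sep.length)) sep := by
  rw [pv_splitOn_eq sep hsep, pv_splitOn_eq sep hsep, pv_splitRec_step sep hsep]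

theorem pv_headD (sep : List Char) (hsep : sep ≠ []) (l : List Char) :
    (PySem.Chars.splitOn l sep).headD [] =
      if PySem.Chars.find l sep < 0 then l else l.take (PySem.Chars.find l sep).toNat := by
  rw [pv_splitOn_step sep hsep]
  split <;> simp

theorem pv_tail (sep : List Char) (hsep : sep ≠ []) (l : List Char) :
    (PySem.Chars.splitOn l sep).tail =
      if PySem.Chars.find l sep < 0 then []
      else PySem.Chars.splitOn (l.drop ((PySem.Chars.find l sep).toNat + sep.length)) sep := by
  rw [pv_splitOn_step sep hsep]
  split <;> simp

theorem pv_step_eq (d : PySem.Dict (List Char) (List (List Int))) (s : List Char) :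
    pvStepB d s = pvStepA d s := by
  simp only [pvStepA, pvStepB]
  rw [pv_headD ['\n'] (by simp) s, pv_tail ['\n'] (by simp) s,
    pv_headD ['-', 't', 'o', '-'] (by simp)]
  by_cases hi : PySem.Chars.find s ['\n'] < 0
  · simp [hi]
  · simp only [hi, if_false]
    simp [pvParseBody, pv_ints_eq]

theorem pv_scan_eq_aux : ∀ (n : Nat) (rest : List Char), rest.length ≤ n →
    ∀ d, pvScan rest d = (PySem.Chars.splitOn rest ['\n', '\n']).foldl pvStepA d := by
  intro n
  induction n with
  | zero =>
    intro rest h d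
    have hr : rest = [] := by
      cases rest with
      | nil => rfl
      | cons a t => simp at h
    subst hr
    have hf : PySem.Chars.find [] ['\n', '\n'] = -1 := by decide
    rw [pvScan, pv_splitOn_step _ (by simp), hf]
    simp [pv_step_eq]
  | succ n ih =>
    intro rest h d
    rw [pvScan, pv_splitOn_step _ (by simp)]
    by_cases hlt : PySem.Chars.find rest ['\n', '\n'] < 0
    · simp only [hlt, if_true]
      simp [pv_step_eq]
    · simp only [hlt, if_false]
      have h0 : (0 : Int) ≤ PySem.Chars.find rest ['\n', '\n'] := by omega
      have hinf := (PySem.Chars.find_nonneg_iff (s := rest) (sub := ['\n', '\n'])).mp h0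
      have hlen : 2 ≤ rest.length := by simpa using hinf.length_le
      rw [ih _ (by simp only [List.length_drop]; omega)]
      simp [pv_step_eq]

theorem pv_scan_eq (rest : List Char) (d : PySem.Dict (List Char) (List (List Int))) :
    pvScan rest d = (PySem.Chars.splitOn rest ['\n', '\n']).foldl pvStepA d :=
  pv_scan_eq_aux rest.length rest le_rfl d

-- ===== VERDICT (by name: the statement is the Claim_ definition above) =====
theorem parse_almanac_spec : Claim_equal_parse_almanac := by
  intro data _ _
  unfold Spec_parse_almanac
  simp only [parse_almanac, parse_almanac_alt]
  rw [pv_headD ['\n', '\n'] (by simp) data.toList, pv_ints_eq]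
  rw [pv_tail ['\n', '\n'] (by simp) data.toList]
  by_cases hs : PySem.Chars.find data.toList ['\n', '\n'] < 0
  · simp [hs]
  · simp only [hs, if_false]
    rw [pv_scan_eq]
    rfl
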